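-- pv_equiv track=rewrite | github.com/tetious/rag-cookbook | 04-graph-rag/generation.py | build_entity_context
-- ===== SOURCE A (Python) =====
-- def build_entity_context(query_entities: list, related_entities: dict) -> str:
--     """Build a description of the entities found."""
--     if not query_entities and not related_entities:
--         return ""
--
--     parts = []
--
--     if query_entities:
--         parts.append(f"Key entities in your question: {', '.join(query_entities)}")
--
--     if related_entities:
--         # Group by distance
--         by_distance = {}
--         for entity, distance in related_entities.items():
--             if distance not in by_distance:
--                 by_distance[distance] = []
--             by_distance[distance].append(entity)
--
--         for distance in sorted(by_distance.keys()):
--             entities = by_distance[distance][:5]  # Limit per level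
--             parts.append(f"Related entities ({distance} hop{'s' if distance > 1 else ''} away): {', '.join(entities)}")
--
--     return "\n".join(parts)
-- ===== SOURCE B (Python) =====
-- def build_entity_context(query_entities: list, related_entities: dict) -> str:
--     """Build a description of the entities found."""
--     if not query_entities and not related_entities:
--         return ""
--     parts = []
--     if query_entities:
--         parts.append(f"Key entities in your question: {', '.join(query_entities)}")
--     # Sort the items once by distance (stable, keeps dict order within a level),
--     # then emit one line per run of equal distances in a single scan.
--     items = sorted(related_entities.items(), key=lambda kv: kv[1])
--     while items:
--         d = items[0][1]
--         k = 1
--         while k < len(items) and items[k][1] == d: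
--             k += 1
--         names = ", ".join(e for e, _ in items[:k][:5])
--         parts.append(f"Related entities ({d} hop{'s' if d > 1 else ''} away): {names}")
--         items = items[k:]
--     return "\n".join(parts)
-- ===== Notes on version B (the rewrite author's own statement) =====
-- stated objective: alternative
-- what changed: A groups entities into a by-distance dict with membership checks and then sorts the dict keys; B stably sorts the items once by distance and emits one line per run of equal distances in a single scan, relying on sort stability to keep A's within-level order.
import Mathlib
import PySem

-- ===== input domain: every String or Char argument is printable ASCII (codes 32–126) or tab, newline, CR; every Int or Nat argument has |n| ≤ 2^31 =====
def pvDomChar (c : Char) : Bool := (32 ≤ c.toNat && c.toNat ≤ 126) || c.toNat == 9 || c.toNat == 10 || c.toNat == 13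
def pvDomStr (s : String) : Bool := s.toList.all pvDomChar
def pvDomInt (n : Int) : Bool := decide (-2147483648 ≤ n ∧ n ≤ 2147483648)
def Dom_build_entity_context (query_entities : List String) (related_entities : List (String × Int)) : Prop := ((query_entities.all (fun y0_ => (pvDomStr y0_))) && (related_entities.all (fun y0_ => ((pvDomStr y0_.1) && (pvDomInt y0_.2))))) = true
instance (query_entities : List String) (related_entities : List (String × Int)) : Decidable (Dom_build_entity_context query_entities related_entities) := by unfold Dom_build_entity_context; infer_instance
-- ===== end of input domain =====

-- B replaces A's group-by-distance dict (+ sort of its keys) by one stable sort of the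
-- items by distance followed by a single scan that emits one line per run of equal
-- distances (objective: alternative, same asymptotic cost).

-- the f-string both Pythons contain verbatim
def pvLine (dist : Int) (entities : List String) : String :=
  "Related entities (" ++ PySem.Int.toStr dist ++ " hop" ++ (if dist > 1 then "s" else "") ++ " away): " ++ PySem.Str.join ", " entities

-- ===== PORT A =====
-- the 'for entity, distance in related_entities.items(): …' grouping loop of A
def pvByDistance (related_entities : List (String × Int)) : PySem.Dict Int (List String) :=
  related_entities.foldl (fun d p =>
    -- if distance not in by_distance: by_distance[distance] = []
    let d1 := if d.contains p.2 = true then d else d.insert p.2 ([] : List String)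
    -- by_distance[distance].append(entity)
    d1.modify p.2 [] (fun l => l ++ [p.1])) PySem.Dict.empty

def build_entity_context (query_entities : List String) (related_entities : List (String × Int)) : String :=
  if query_entities.isEmpty && related_entities.isEmpty then "" else
  let parts : List String := []
  let parts := if !query_entities.isEmpty then
      parts ++ ["Key entities in your question: " ++ PySem.Str.join ", " query_entities]
    else parts
  let parts := if !related_entities.isEmpty then
      let by_distance := pvByDistance related_entities
      (PySem.List.sorted by_distance.keys (fun x => x) false).foldl
        (fun ps dist => ps ++ [pvLine dist (PySem.List.slice (by_distance.getD dist []) none (some 5))]) parts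
    else parts
  PySem.Str.join "\n" parts

-- ===== PORT B =====
-- Source B's 'while items:' loop: 'items[:k]' is the run of equal distances
-- ((e,d) :: takeWhile …), 'items[k:]' is dropWhile …; one line per run.
def pvGroupLines : List (String × Int) → List String
  | [] => []
  | (e, d) :: rest =>
      pvLine d ((((e, d) :: rest.takeWhile (fun p => p.2 == d)).take 5).map (·.1))
        :: pvGroupLines (rest.dropWhile (fun p => p.2 == d))
termination_by S => S.length
decreasing_by
  simp only [List.length_cons]
  exact Nat.lt_succ_of_le (List.length_dropWhile_le _ _)

def build_entity_context_alt (query_entities : List String) (related_entities : List (String × Int)) : String :=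
  if query_entities.isEmpty && related_entities.isEmpty then "" else
  let parts : List String := []
  let parts := if !query_entities.isEmpty then
      parts ++ ["Key entities in your question: " ++ PySem.Str.join ", " query_entities]
    else parts
  PySem.Str.join "\n" (parts ++ pvGroupLines (PySem.List.sorted related_entities (fun p => p.2) false))

-- ===== PRECONDITION & SPEC =====
def Spec_build_entity_context (query_entities : List String) (related_entities : List (String × Int)) (out : String) : Prop := out = build_entity_context_alt query_entities related_entities
instance (query_entities : List String) (related_entities : List (String × Int)) (out : String) : Decidable (Spec_build_entity_context query_entities related_entities out) := by unfold Spec_build_entity_context; infer_instance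

-- ===== CLAIM (what is proved, stated in full; the proofs are below) =====
def Claim_equal_build_entity_context : Prop := ∀ (query_entities : List String) (related_entities : List (String × Int)), Dom_build_entity_context query_entities related_entities → Spec_build_entity_context query_entities related_entities (build_entity_context query_entities related_entities)

-- ===== LEMMAS AND PROOFS =====

theorem pv_step_eq (d : PySem.Dict Int (List String)) (p : String × Int) :
    ((if d.contains p.2 = true then d else d.insert p.2 ([] : List String)).modify p.2 [] (fun l => l ++ [p.1]))
      = d.modify p.2 [] (fun l => l ++ [p.1]) := by
  by_cases h : d.contains p.2 = true
  · simp [h]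
  · rw [if_neg h, PySem.Dict.modify, PySem.Dict.modify, PySem.Dict.getD_insert_self,
      PySem.Dict.insert_insert_self,
      PySem.Dict.getD_of_not_contains d [] (by simpa using h)]

theorem pv_byDistance_eq (re : List (String × Int)) :
    pvByDistance re = (re.map Prod.swap).foldl (fun d p => d.modify p.1 [] (fun l => l ++ [p.2])) PySem.Dict.empty := by
  rw [List.foldl_map, pvByDistance]
  exact PySem.List.foldl_congr_mem _ _ _ _ (fun acc x _ => pv_step_eq acc x)

theorem pv_getD_byDistance (re : List (String × Int)) (c : Int) :
    (pvByDistance re).getD c [] = (re.filter (fun p => p.2 == c)).map (·.1) := by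
  rw [pv_byDistance_eq, PySem.Dict.getD_foldl_modify_append]
  simp [List.filter_map, Function.comp_def, Prod.swap]

theorem pv_keys_byDistance (re : List (String × Int)) :
    (pvByDistance re).keys = PySem.Set.ofList (re.map (·.2)) := by
  rw [pv_byDistance_eq,
    PySem.Dict.keys_foldl_modify_key (List.map Prod.swap re) (fun p => p.1) [] (fun _ p v => v ++ [p.2])]
  simp only [PySem.Dict.keys_empty, List.map_map]
  rw [PySem.Set.update_nil_left]
  simp [Function.comp_def, Prod.swap]

theorem pv_insertBy_cons (before : (String × Int) → (String × Int) → Bool) (x y : String × Int) (ys : List (String × Int)) :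
    PySem.List.insertBy before x (y :: ys) = if before x y then x :: y :: ys else y :: PySem.List.insertBy before x ys := by
  simp [PySem.List.insertBy]

theorem pv_pairwise_insertBy (x : String × Int) (ys : List (String × Int))
    (h : ys.Pairwise (fun a b => a.2 ≤ b.2)) :
    (PySem.List.insertBy (fun a b => decide (a.2 < b.2)) x ys).Pairwise (fun a b => a.2 ≤ b.2) := by
  induction ys with
  | nil => simp [PySem.List.insertBy]
  | cons y ys ih =>
    rw [List.pairwise_cons] at h
    by_cases hxy : x.2 < y.2
    · rw [pv_insertBy_cons, if_pos (by simpa using hxy)]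
      refine List.Pairwise.cons ?_ (List.Pairwise.cons h.1 h.2)
      intro z hz
      rcases List.mem_cons.1 hz with rfl | hz'
      · exact le_of_lt hxy
      · exact le_of_lt (lt_of_lt_of_le hxy (h.1 z hz'))
    · rw [pv_insertBy_cons, if_neg (by simpa using hxy)]
      refine List.Pairwise.cons ?_ (ih h.2)
      intro z hz
      rcases (PySem.List.mem_insertBy _ _ _ _).1 hz with rfl | hz'
      · exact le_of_not_gt hxy
      · exact h.1 z hz'

theorem pv_filter_insertBy (c : Int) (x : String × Int) (ys : List (String × Int))
    (h : ys.Pairwise (fun a b => a.2 ≤ b.2)) :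
    (PySem.List.insertBy (fun a b => decide (a.2 < b.2)) x ys).filter (fun p => p.2 == c)
      = ys.filter (fun p => p.2 == c) ++ if x.2 == c then [x] else [] := by
  induction ys with
  | nil => by_cases hc : x.2 == c <;> simp [PySem.List.insertBy, hc]
  | cons y ys ih =>
    rw [List.pairwise_cons] at h
    by_cases hxy : x.2 < y.2
    · rw [pv_insertBy_cons, if_pos (by simpa using hxy)]
      by_cases hc : x.2 = c
      · have hy : ¬ (y.2 = c) := by omega
        have hfil : List.filter (fun p => p.2 == c) ys = [] :=
          List.filter_eq_nil_iff.2 (fun z hz => by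
            have := h.1 z hz; simp; omega)
        simp [hc, hy, hfil]
      · simp [List.filter_cons, hc]
    · rw [pv_insertBy_cons, if_neg (by simpa using hxy), List.filter_cons, List.filter_cons, ih h.2]
      by_cases hy : y.2 = c <;> simp [hy]

theorem pv_filter_foldl (c : Int) (l : List (String × Int)) :
    ∀ acc : List (String × Int), acc.Pairwise (fun a b => a.2 ≤ b.2) →
      (l.foldl (fun acc x => PySem.List.insertBy (fun a b => decide (a.2 < b.2)) x acc) acc).filter (fun p => p.2 == c)
        = acc.filter (fun p => p.2 == c) ++ l.filter (fun p => p.2 == c) := by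
  induction l with
  | nil => intro acc _; simp
  | cons x l ih =>
    intro acc hacc
    rw [List.foldl_cons, ih _ (pv_pairwise_insertBy x acc hacc), pv_filter_insertBy c x acc hacc,
      List.filter_cons]
    by_cases hc : x.2 = c <;> simp [hc]

theorem pv_filter_sorted (re : List (String × Int)) (c : Int) :
    (PySem.List.sorted re (fun p => p.2) false).filter (fun p => p.2 == c)
      = re.filter (fun p => p.2 == c) := by
  have h := PySem.List.sorted_eq_foldl_insertBy re (fun p => p.2)
  rw [show PySem.List.sorted re (fun p => p.2) false = PySem.List.sorted re (fun p => p.2) from rfl, h,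
    pv_filter_foldl c re [] List.Pairwise.nil]
  simp

theorem pv_ofList_pairwise_lt (zs : List Int) (h : zs.Pairwise (· ≤ ·)) :
    (PySem.Set.ofList zs).Pairwise (· < ·) := by
  induction zs with
  | nil => simp [PySem.Set.ofList]
  | cons z zs ih =>
    rw [List.pairwise_cons] at h
    rw [PySem.Set.ofList_cons]
    refine List.Pairwise.cons ?_ ?_
    · intro y hy
      rw [PySem.Set.discard] at hy
      have hmem := List.mem_of_mem_filter hy
      have hne : ¬ (y == z) := by
        have := List.of_mem_filter hy; simpa using this
      have : z ≤ y := h.1 y ((PySem.Set.mem_ofList _ _).1 hmem)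
      simp at hne; omega
    · rw [PySem.Set.discard]
      exact List.Pairwise.filter _ (ih h.2)

theorem pv_dedup_run (d : Int) (tk rk : List Int) (ht : ∀ z ∈ tk, z = d) (hr : d ∉ rk) :
    PySem.Set.ofList (d :: (tk ++ rk)) = d :: PySem.Set.ofList rk := by
  rw [PySem.Set.ofList_cons]
  congr 1
  induction tk with
  | nil =>
    simp only [List.nil_append, PySem.Set.discard]
    exact List.filter_eq_self.2 (fun y hy => by
      have : y ∈ rk := (PySem.Set.mem_ofList _ _).1 hy
      simp; rintro rfl; exact hr this)
  | cons z tk ih =>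
    have hz : z = d := ht z (by simp)
    subst hz
    rw [List.cons_append, PySem.Set.ofList_cons, PySem.Set.discard, PySem.Set.discard,
      List.filter_cons]
    simp only [BEq.rfl, Bool.not_true]
    rw [List.filter_filter]
    have : (fun y => (!y == z) && (!y == z)) = (fun y => !y == z) := by
      funext y; by_cases h : y = z <;> simp [h]
    rw [this]
    have ih' := ih (fun w hw => ht w (by simp [hw]))
    rw [PySem.Set.discard] at ih'
    exact ih'

theorem pv_dropWhile_gt (d : Int) (rest : List (String × Int))
    (h1 : ∀ q ∈ rest, d ≤ q.2) (h2 : rest.Pairwise (fun a b => a.2 ≤ b.2)) :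
    ∀ q ∈ rest.dropWhile (fun q => q.2 == d), d < q.2 := by
  intro q hq
  cases hE : rest.dropWhile (fun q => q.2 == d) with
  | nil => rw [hE] at hq; cases hq
  | cons q0 r' =>
    have hsub := List.dropWhile_sublist (l := rest) (fun q => q.2 == d)
    rw [hE] at hsub
    have hne0 : ((fun q : String × Int => q.2 == d) q0) = false := by
      have hne' : rest.dropWhile (fun q => q.2 == d) ≠ [] := by rw [hE]; simp
      have := List.head_dropWhile_not (fun q : String × Int => q.2 == d) hne'
      simp only [hE, List.head_cons] at this
      simpa using this
    rw [hE] at hq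
    rcases List.mem_cons.1 hq with rfl | hq'
    · have := h1 q (hsub.mem (by simp)); simp at hne0; omega
    · have hpar := List.Pairwise.sublist hsub h2
      have hle0 : q0.2 ≤ q.2 := (List.pairwise_cons.1 hpar).1 q hq'
      have hd0 : d ≤ q0.2 := h1 q0 (hsub.mem (by simp))
      simp at hne0; omega

theorem pv_groupLines_aux (n : Nat) : ∀ (S : List (String × Int)), S.length ≤ n →
    S.Pairwise (fun a b => a.2 ≤ b.2) →
    pvGroupLines S = (PySem.Set.ofList (S.map (·.2))).map
      (fun c => pvLine c (((S.filter (fun p => p.2 == c)).take 5).map (·.1))) := by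
  induction n with
  | zero =>
    intro S hS _
    have : S = [] := List.eq_nil_of_length_eq_zero (Nat.le_zero.1 hS)
    subst this; simp [pvGroupLines, PySem.Set.ofList]
  | succ n ih =>
    intro S hS h
    match S with
    | [] => simp [pvGroupLines, PySem.Set.ofList]
    | (e, d) :: rest =>
      rw [List.pairwise_cons] at h
      have h1 : ∀ q ∈ rest, d ≤ q.2 := fun q hq => by simpa using h.1 q hq
      obtain ⟨t, r, hT, hR⟩ :
          ∃ t r, rest.takeWhile (fun q => q.2 == d) = t ∧ rest.dropWhile (fun q => q.2 == d) = r :=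
        ⟨_, _, rfl, rfl⟩
      have ht : ∀ q ∈ t, q.2 = d := fun q hq => by
        rw [← hT] at hq
        simpa using List.mem_takeWhile_imp hq
      have hr : ∀ q ∈ r, d < q.2 := fun q hq => pv_dropWhile_gt d rest h1 h.2 q (hR ▸ hq)
      have hpar_r : r.Pairwise (fun a b => a.2 ≤ b.2) :=
        List.Pairwise.sublist (hR ▸ List.dropWhile_sublist _) h.2
      have hlen : r.length ≤ n := by
        have := hR ▸ List.length_dropWhile_le (fun q : String × Int => q.2 == d) rest
        simp only [List.length_cons] at hS; omega
      have hrest : t ++ r = rest := by rw [← hT, ← hR]; exact List.takeWhile_append_dropWhile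
      rw [pvGroupLines, hT, hR]
      subst hrest
      have hkeys : ((e, d) :: (t ++ r)).map (fun q => q.2)
          = d :: ((t.map (fun q => q.2)) ++ (r.map (fun q => q.2))) := by simp
      rw [hkeys, pv_dedup_run d _ _
        (by intro z hz; rcases List.mem_map.1 hz with ⟨q, hq, rfl⟩; exact ht q hq)
        (by intro hd; rcases List.mem_map.1 hd with ⟨q, hq, hqd⟩; have := hr q hq; omega)]
      rw [List.map_cons]
      congr 1
      · have hfil : ((e, d) :: (t ++ r)).filter (fun q => q.2 == d) = (e, d) :: t := by
          rw [List.filter_cons, if_pos (by simp), List.filter_append,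
            List.filter_eq_self.2 (fun q hq => by simpa using ht q hq),
            List.filter_eq_nil_iff.2 (fun q hq => by have := hr q hq; simp; omega)]
          simp
        rw [hfil]
      · rw [ih r hlen hpar_r]
        refine (List.map_congr_left ?_).symm
        intro c hc
        have hcr := (PySem.Set.mem_ofList _ _).1 hc
        rcases List.mem_map.1 hcr with ⟨q, hq, rfl⟩
        have hdc : d < q.2 := hr q hq
        have hfil : ((e, d) :: (t ++ r)).filter (fun x => x.2 == q.2) = r.filter (fun x => x.2 == q.2) := by
          rw [List.filter_cons, if_neg (by simp; omega), List.filter_append,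
            List.filter_eq_nil_iff.2 (fun w hw => by have := ht w hw; simp; omega)]
          simp
        rw [hfil]

theorem pv_groupLines (S : List (String × Int)) (h : S.Pairwise (fun a b => a.2 ≤ b.2)) :
    pvGroupLines S = (PySem.Set.ofList (S.map (·.2))).map
      (fun c => pvLine c (((S.filter (fun p => p.2 == c)).take 5).map (·.1))) :=
  pv_groupLines_aux S.length S le_rfl h
theorem pv_sorted_keys (re : List (String × Int)) :
    PySem.List.sorted (PySem.Set.ofList (re.map (·.2))) (fun x => x) false
      = PySem.Set.ofList ((PySem.List.sorted re (fun p => p.2) false).map (fun p => p.2)) := by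
  apply PySem.List.sorted_eq_of_perm_of_pairwise_lt
  · rw [List.perm_ext_iff_of_nodup (PySem.Set.nodup_ofList _) (PySem.Set.nodup_ofList _)]
    intro c
    simp [PySem.Set.mem_ofList, PySem.List.mem_sorted]
  · exact pv_ofList_pairwise_lt _ (PySem.List.sorted_map_key_pairwise re (fun p => p.2))

theorem pv_main (qe : List String) (re : List (String × Int)) :
    build_entity_context qe re = build_entity_context_alt qe re := by
  simp only [build_entity_context, build_entity_context_alt]
  by_cases h0 : (qe.isEmpty && re.isEmpty) = true
  · simp [h0]
  · rw [if_neg h0, if_neg h0]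
    congr 1
    by_cases hre : re.isEmpty = true
    · have : re = [] := by simpa using hre
      subst this
      simp [pvGroupLines, PySem.List.sorted]
    · rw [if_pos (by simpa using hre), PySem.List.foldl_append_singleton_eq_map]
      congr 1
      rw [pv_keys_byDistance, pv_sorted_keys,
        pv_groupLines _ (PySem.List.sorted_pairwise re (fun p => p.2))]
      apply List.map_congr_left
      intro c hc
      rw [pv_getD_byDistance, PySem.List.slice_to _ (by norm_num), pv_filter_sorted]
      congr 1
      rw [List.map_take]
      norm_num [Int.toNat]

-- ===== VERDICT (by name: the statement is the Claim_ definition above) =====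
theorem build_entity_context_spec : Claim_equal_build_entity_context := by
  intro qe re _
  show build_entity_context qe re = build_entity_context_alt qe re
  exact pv_main qe re
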